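-- pv_equiv track=rewrite | github.com/daniel-reich/ubiquitous-fiesta | eoK63mG5tJDu439nJ_23.py | isWordChain
-- ===== SOURCE A (Python) =====
-- def isWordChain(words):
--   for i in range(len(words)-1):
--     if len(words[i]) == len(words[i+1]):
--       diff  = 0
--       for j in range(len(words[i])):
--         if words[i][j] != words[i+1][j]: diff += 1
--       if diff != 1: return False
--     if len(words[i]) < len(words[i+1]):
--       if len(words[i])+1 == len(words[i+1]) and words[i] in words[i+1]:
--         continue
--       elif len(words[i])+1 != len(words[i+1]): return False
--       else:
--         diff = 0
--         for j in range(len(words[i+1])):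
--           if words[i][j-diff] != words[i+1][j]:
--             diff += 1
--         if diff != 1: return False
--     if len(words[i]) > len(words[i+1]):
--       if len(words[i])-1 == len(words[i+1]) and words[i+1] in words[i]:
--         continue
--       elif len(words[i])-1 != len(words[i+1]): return False
--       else:
--         diff = 0
--         for j in range(len(words[i])):
--           if words[i][j] != words[i+1][j-diff]:
--             diff += 1
--         if diff != 1: return False
--   return True
-- ===== SOURCE B (Python) =====
-- def one_edit(a, b):
--     la, lb = len(a), len(b)
--     if abs(la - lb) > 1:
--         return False
--     i = 0
--     while i < min(la, lb) and a[i] == b[i]: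
--         i += 1
--     if la == lb:
--         return i < la and a[i+1:] == b[i+1:]
--     if la < lb:
--         return a[i:] == b[i+1:]
--     return a[i+1:] == b[i:]
--
-- def isWordChain(words):
--     return all(one_edit(a, b) for a, b in zip(words, words[1:]))
-- ===== Notes on version B (the rewrite author's own statement) =====
-- stated objective: simpler
-- what changed: Replaced A's three branch-specific mismatch-counting index scans (with substring shortcuts and shifted j-diff indexing) by a single two-pointer one_edit helper that skips the common prefix once and compares the remaining suffixes, applied with all() over adjacent pairs.
import Mathlib
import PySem

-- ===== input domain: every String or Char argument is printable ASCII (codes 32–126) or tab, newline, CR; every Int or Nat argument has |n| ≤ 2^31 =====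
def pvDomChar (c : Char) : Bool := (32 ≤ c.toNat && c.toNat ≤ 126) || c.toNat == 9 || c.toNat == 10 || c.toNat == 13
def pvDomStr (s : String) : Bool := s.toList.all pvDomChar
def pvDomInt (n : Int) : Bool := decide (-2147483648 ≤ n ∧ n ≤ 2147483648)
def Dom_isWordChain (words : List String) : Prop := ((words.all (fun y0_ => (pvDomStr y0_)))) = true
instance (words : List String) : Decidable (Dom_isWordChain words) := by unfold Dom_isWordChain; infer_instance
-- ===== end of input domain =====

-- B replaces A's three branch-specific mismatch-counting index scans by a single two-pointer
-- helper (skip the common prefix once, then compare the remaining suffixes) applied over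
-- adjacent pairs: simpler, same asymptotic cost.


-- ===== PORT A =====
-- Indexing uses PySem.List.pyGetD with a default character: every index A's Python actually
-- evaluates is in range (diff ≤ j throughout each scan, and the all-prefix-matched case is
-- short-circuited by the substring test before the scan runs), so the default is never compared.
def pvDef : Char := Char.ofNat 0

-- body of 'if words[i][j] != words[i+1][j]: diff += 1' (equal-length branch)
def stepEq (as bs : List Char) (d j : Int) : Int :=
  if PySem.List.pyGetD as j pvDef ≠ PySem.List.pyGetD bs j pvDef then d + 1 else d

-- body of 'if words[i][j-diff] != words[i+1][j]: diff += 1' (shorter-first branch)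
def stepIns (as bs : List Char) (d j : Int) : Int :=
  if PySem.List.pyGetD as (j - d) pvDef ≠ PySem.List.pyGetD bs j pvDef then d + 1 else d

-- body of 'if words[i][j] != words[i+1][j-diff]: diff += 1' (longer-first branch)
def stepDel (as bs : List Char) (d j : Int) : Int :=
  if PySem.List.pyGetD as j pvDef ≠ PySem.List.pyGetD bs (j - d) pvDef then d + 1 else d

-- one iteration of A's outer loop over the pair (words[i], words[i+1]): true = fall through / continue
def stepA (a b : String) : Bool :=
  let as := a.toList
  let bs := b.toList
  if as.length = bs.length then
    ((PySem.List.pyRange 0 (as.length : Int) 1).foldl (stepEq as bs) 0) == 1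
  else if as.length < bs.length then
    if as.length + 1 = bs.length ∧ PySem.Chars.isIn as bs then true
    else if as.length + 1 ≠ bs.length then false
    else ((PySem.List.pyRange 0 (bs.length : Int) 1).foldl (stepIns as bs) 0) == 1
  else
    if as.length - 1 = bs.length ∧ PySem.Chars.isIn bs as then true
    else if as.length - 1 ≠ bs.length then false
    else ((PySem.List.pyRange 0 (as.length : Int) 1).foldl (stepDel as bs) 0) == 1

def isWordChain : List String → Bool
  | w1 :: w2 :: rest => if stepA w1 w2 then isWordChain (w2 :: rest) else false
  | _ => true

-- ===== PORT B =====
-- the 'while i < min(la, lb) and a[i] == b[i]: i += 1' two-pointer loop of Source B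
def cpl : List Char → List Char → Nat
  | [], _ => 0
  | _ :: _, [] => 0
  | a :: as, b :: bs => if a = b then cpl as bs + 1 else 0

def oneEdit (a b : String) : Bool :=
  let as := a.toList
  let bs := b.toList
  if ((as.length : Int) - (bs.length : Int)).natAbs > 1 then false
  else
    let i := cpl as bs
    if as.length = bs.length then decide (i < as.length) && (as.drop (i + 1) == bs.drop (i + 1))
    else if as.length < bs.length then as.drop i == bs.drop (i + 1)
    else as.drop (i + 1) == bs.drop i

def isWordChain_alt (words : List String) : Bool :=
  (words.zip words.tail).all fun p => oneEdit p.1 p.2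

-- ===== PRECONDITION & SPEC =====
def Spec_isWordChain (words : List String) (out : Bool) : Prop := out = isWordChain_alt words
instance (words : List String) (out : Bool) : Decidable (Spec_isWordChain words out) := by unfold Spec_isWordChain; infer_instance

-- ===== CLAIM (what is proved, stated in full; the proofs are below) =====
def Claim_equal_isWordChain : Prop := ∀ (words : List String), Dom_isWordChain words → Spec_isWordChain words (isWordChain words)

-- ===== LEMMAS AND PROOFS =====

-- recursive model of the shifted scan: drives over bs, advances as only on a match
def go2 : List Char → List Char → Int → Int
  | _, [], d => d
  | as, b :: bs, d =>
    if as.headD pvDef ≠ b then go2 as bs (d + 1) else go2 as.tail bs d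

-- recursive model of the equal-length scan: advances both in sync
def goEq : List Char → List Char → Int → Int
  | _, [], d => d
  | as, b :: bs, d =>
    if as.headD pvDef ≠ b then goEq as.tail bs (d + 1) else goEq as.tail bs d

lemma headD_drop {α : Type} (xs : List α) (j : Nat) (d : α) :
    (xs.drop j).headD d = xs.getD j d := by
  induction xs generalizing j with
  | nil => cases j <;> simp [List.getD]
  | cons x xs ih => cases j <;> simp [List.getD]

lemma foldEq_eq_goEq (n : Nat) (as bs : List Char) (j : Nat) (d : Int)
    (hn : j + n = bs.length) :
    (PySem.List.pyRange (j : Int) (bs.length : Int) 1).foldl (stepEq as bs) d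
      = goEq (as.drop j) (bs.drop j) d := by
  induction n generalizing j d with
  | zero =>
    rw [PySem.List.pyRange_one_eq_nil (by omega)]
    have hnil : bs.drop j = [] := List.drop_eq_nil_of_le (by omega)
    rw [hnil]
    simp [goEq]
  | succ n ih =>
    have hjlt : j < bs.length := by omega
    rw [PySem.List.pyRange_one_cons (by exact_mod_cast hjlt)]
    rw [List.foldl_cons, List.drop_eq_getElem_cons hjlt]
    have hhead : (as.drop j).headD pvDef = PySem.List.pyGetD as (j : Int) pvDef := by
      rw [headD_drop, PySem.List.pyGetD_natCast]
    have hbj : PySem.List.pyGetD bs (j : Int) pvDef = bs[j] := by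
      rw [PySem.List.pyGetD_natCast]
      exact List.getD_eq_getElem bs pvDef hjlt
    have hcast : ((j : Int) + 1) = ((j + 1 : Nat) : Int) := by push_cast; ring
    simp only [stepEq, goEq, List.tail_drop]
    by_cases hcond : PySem.List.pyGetD as (j : Int) pvDef = PySem.List.pyGetD bs (j : Int) pvDef
    · rw [if_neg (by simp [hcond]), if_neg (by rw [hhead, ← hbj]; simp [hcond]),
        hcast, ih (j + 1) d (by omega)]
    · rw [if_pos (by simpa using hcond), if_pos (by rw [hhead, ← hbj]; simpa using hcond),
        hcast, ih (j + 1) (d + 1) (by omega)]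

lemma foldIns_eq_go2 (n : Nat) (as bs : List Char) (j d : Nat)
    (hn : j + n = bs.length) (hd : d ≤ j) :
    (PySem.List.pyRange (j : Int) (bs.length : Int) 1).foldl (stepIns as bs) (d : Int)
      = go2 (as.drop (j - d)) (bs.drop j) (d : Int) := by
  induction n generalizing j d with
  | zero =>
    rw [PySem.List.pyRange_one_eq_nil (by omega)]
    have hnil : bs.drop j = [] := List.drop_eq_nil_of_le (by omega)
    rw [hnil]
    simp [go2]
  | succ n ih =>
    have hjlt : j < bs.length := by omega
    rw [PySem.List.pyRange_one_cons (by exact_mod_cast hjlt)]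
    rw [List.foldl_cons, List.drop_eq_getElem_cons hjlt]
    have hsub : (j : Int) - (d : Int) = ((j - d : Nat) : Int) := by omega
    have hhead : (as.drop (j - d)).headD pvDef = PySem.List.pyGetD as ((j : Int) - d) pvDef := by
      rw [hsub, headD_drop, PySem.List.pyGetD_natCast]
    have hbj : PySem.List.pyGetD bs (j : Int) pvDef = bs[j] := by
      rw [PySem.List.pyGetD_natCast]
      exact List.getD_eq_getElem bs pvDef hjlt
    have hcastj : ((j : Int) + 1) = ((j + 1 : Nat) : Int) := by push_cast; ring
    have hcastd : ((d : Int) + 1) = ((d + 1 : Nat) : Int) := by push_cast; ring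
    simp only [stepIns, go2, List.tail_drop]
    by_cases hcond :
        PySem.List.pyGetD as ((j : Int) - d) pvDef = PySem.List.pyGetD bs (j : Int) pvDef
    · rw [if_neg (by simp [hcond]), if_neg (by rw [hhead, ← hbj]; simp [hcond])]
      have hdr : j - d + 1 = j + 1 - d := by omega
      rw [hdr, hcastj, ih (j + 1) d (by omega) (by omega)]
    · rw [if_pos (by simpa using hcond), if_pos (by rw [hhead, ← hbj]; simpa using hcond)]
      have hdr : j - d = j + 1 - (d + 1) := by omega
      rw [hdr, hcastj, hcastd, ih (j + 1) (d + 1) (by omega) (by omega)]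

lemma go2_mono (bs as : List Char) (d : Int) : d ≤ go2 as bs d := by
  induction bs generalizing as d with
  | nil => simp [go2]
  | cons b bs ih =>
    simp only [go2]
    split
    · exact le_trans (by omega) (ih _ _)
    · exact ih _ _

lemma goEq_mono (bs as : List Char) (d : Int) : d ≤ goEq as bs d := by
  induction bs generalizing as d with
  | nil => simp [goEq]
  | cons b bs ih =>
    simp only [goEq]
    split
    · exact le_trans (by omega) (ih _ _)
    · exact ih _ _

lemma go2_fixed_iff (bs as : List Char) (d : Int) (h : as.length = bs.length) :
    (go2 as bs d = d ↔ as = bs) := by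
  induction bs generalizing as d with
  | nil => cases as <;> simp_all [go2]
  | cons b bs ih =>
    cases as with
    | nil => simp at h
    | cons a as =>
      by_cases hab : a = b
      · subst hab
        have hg : go2 (a :: as) (a :: bs) d = go2 as bs d := by simp [go2]
        rw [hg, ih as d (by simpa using h)]
        simp
      · have hg : go2 (a :: as) (b :: bs) d = go2 (a :: as) bs (d + 1) := by
          simp [go2, hab]
        rw [hg]
        constructor
        · intro hfix
          have := go2_mono bs (a :: as) (d + 1)
          omega
        · intro heq
          injection heq with h1 _
          exact absurd h1 hab

lemma goEq_fixed_iff (bs as : List Char) (d : Int) (h : as.length = bs.length) :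
    (goEq as bs d = d ↔ as = bs) := by
  induction bs generalizing as d with
  | nil => cases as <;> simp_all [goEq]
  | cons b bs ih =>
    cases as with
    | nil => simp at h
    | cons a as =>
      by_cases hab : a = b
      · subst hab
        have hg : goEq (a :: as) (a :: bs) d = goEq as bs d := by simp [goEq]
        rw [hg, ih as d (by simpa using h)]
        simp
      · have hg : goEq (a :: as) (b :: bs) d = goEq as bs (d + 1) := by
          simp [goEq, hab]
        rw [hg]
        constructor
        · intro hfix
          have := goEq_mono bs as (d + 1)
          omega
        · intro heq
          injection heq with h1 _
          exact absurd h1 hab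

lemma cpl_le_left (as bs : List Char) : cpl as bs ≤ as.length := by
  induction as generalizing bs with
  | nil => simp [cpl]
  | cons a as ih =>
    cases bs with
    | nil => simp [cpl]
    | cons b bs =>
      simp only [cpl]
      split
      · have := ih bs; simp; omega
      · simp

lemma cpl_comm (as bs : List Char) : cpl as bs = cpl bs as := by
  induction as generalizing bs with
  | nil => cases bs <;> simp [cpl]
  | cons a as ih =>
    cases bs with
    | nil => simp [cpl]
    | cons b bs =>
      simp only [cpl]
      by_cases hab : a = b
      · subst hab; simp [ih]
      · rw [if_neg hab, if_neg (fun h => hab h.symm)]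

lemma cpl_prefix (as bs : List Char) (hle : as.length ≤ bs.length)
    (h : cpl as bs = as.length) : as <+: bs := by
  induction as generalizing bs with
  | nil => simp
  | cons a as ih =>
    cases bs with
    | nil => simp at hle
    | cons b bs =>
      simp only [cpl] at h
      split at h
      · rename_i hab
        subst hab
        simp only [List.length_cons, Nat.add_right_cancel_iff] at h
        exact (List.prefix_cons_inj a).mpr (ih bs (by simpa using hle) h)
      · simp at h

lemma cpl_self_append (as ys : List Char) : cpl as (as ++ ys) = as.length := by
  induction as with
  | nil => cases ys <;> simp [cpl]
  | cons a as ih => simp [cpl, ih]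

-- spec of the shifted scan when the common prefix ends strictly inside as
lemma go2_spec (bs as : List Char) (hlen : as.length + 1 = bs.length)
    (hc : cpl as bs < as.length) :
    (go2 as bs 0 = 1 ↔ as.drop (cpl as bs) = bs.drop (cpl as bs + 1)) := by
  induction bs generalizing as with
  | nil => simp at hlen
  | cons b bs ih =>
    cases as with
    | nil => simp [cpl] at hc
    | cons a as =>
      by_cases hab : a = b
      · subst hab
        have hcl : cpl (a :: as) (a :: bs) = cpl as bs + 1 := by simp [cpl]
        have hg : go2 (a :: as) (a :: bs) 0 = go2 as bs 0 := by simp [go2]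
        rw [hcl] at hc ⊢
        rw [hg]
        simp only [List.drop_succ_cons]
        exact ih as (by simp at hlen; omega) (by simp at hc; omega)
      · have hcl : cpl (a :: as) (b :: bs) = 0 := by simp [cpl, hab]
        have hg : go2 (a :: as) (b :: bs) 0 = go2 (a :: as) bs 1 := by
          simp [go2, hab]
        rw [hcl, hg]
        simp only [List.drop_zero, List.drop_succ_cons]
        exact go2_fixed_iff bs (a :: as) 1 (by simp at hlen ⊢; omega)

-- spec of the equal-length scan
lemma goEq_spec (bs as : List Char) (hlen : as.length = bs.length) :
    (goEq as bs 0 = 1 ↔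
      cpl as bs < as.length ∧ as.drop (cpl as bs + 1) = bs.drop (cpl as bs + 1)) := by
  induction bs generalizing as with
  | nil =>
    cases as with
    | nil => simp [goEq, cpl]
    | cons a as => simp at hlen
  | cons b bs ih =>
    cases as with
    | nil => simp at hlen
    | cons a as =>
      by_cases hab : a = b
      · subst hab
        have hcl : cpl (a :: as) (a :: bs) = cpl as bs + 1 := by simp [cpl]
        have hg : goEq (a :: as) (a :: bs) 0 = goEq as bs 0 := by simp [goEq]
        rw [hcl, hg, ih as (by simpa using hlen)]
        simp only [List.length_cons, List.drop_succ_cons]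
        constructor <;> rintro ⟨h1, h2⟩ <;> exact ⟨by omega, h2⟩
      · have hcl : cpl (a :: as) (b :: bs) = 0 := by simp [cpl, hab]
        have hg : goEq (a :: as) (b :: bs) 0 = goEq as bs 1 := by
          simp [goEq, hab]
        rw [hcl, hg, goEq_fixed_iff bs as 1 (by simpa using hlen)]
        simp only [List.length_cons, List.drop_succ_cons, List.drop_zero]
        constructor
        · intro h; exact ⟨by omega, h⟩
        · rintro ⟨_, h⟩; exact h

-- the substring shortcut implies B's suffix equation
lemma infix_drop (as bs : List Char) (hlen : as.length + 1 = bs.length)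
    (h : as <:+: bs) : as.drop (cpl as bs) = bs.drop (cpl as bs + 1) := by
  obtain ⟨s, t, hst⟩ := h
  have hlst : s.length + t.length = 1 := by
    have := congrArg List.length hst
    simp at this
    omega
  cases s with
  | nil =>
    cases t with
    | nil => simp at hlst
    | cons c t =>
      have ht : t = [] := List.eq_nil_of_length_eq_zero
        (by simp only [List.length_nil, List.length_cons] at hlst; omega)
      subst ht
      simp only [List.nil_append] at hst
      subst hst
      rw [cpl_self_append]
      rw [List.drop_length]
      rw [List.drop_eq_nil_of_le (by simp)]
  | cons c s =>
    have hs1 : s = [] := List.eq_nil_of_length_eq_zero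
      (by simp only [List.length_cons] at hlst; omega)
    have ht1 : t = [] := List.eq_nil_of_length_eq_zero
      (by simp only [List.length_cons] at hlst; omega)
    subst hs1; subst ht1
    simp only [List.append_nil] at hst
    subst hst
    simp [List.drop_succ_cons]

lemma stepDel_eq (as bs : List Char) : stepDel as bs = stepIns bs as := by
  funext d j
  simp only [stepDel, stepIns, ne_eq]
  by_cases h : PySem.List.pyGetD as j pvDef = PySem.List.pyGetD bs (j - d) pvDef
  · rw [if_neg (by simp [h]), if_neg (by simp [h.symm])]
  · rw [if_pos (by simpa using h), if_pos (by simpa using fun hh => h hh.symm)]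

lemma step_eq (a b : String) : stepA a b = oneEdit a b := by
  simp only [stepA, oneEdit]
  set as := a.toList with has
  set bs := b.toList with hbs
  rcases Nat.lt_trichotomy as.length bs.length with hlt | heq | hgt
  · -- as is strictly shorter
    rw [if_neg (by omega), if_pos hlt]
    by_cases hsucc : as.length + 1 = bs.length
    · rw [if_neg (by omega : ¬ ((as.length : Int) - (bs.length : Int)).natAbs > 1),
        if_neg (by omega : ¬ as.length = bs.length), if_pos hlt]
      by_cases hin : PySem.Chars.isIn as bs = true
      · rw [if_pos ⟨hsucc, hin⟩]
        have hdrop := infix_drop as bs hsucc ((PySem.Chars.isIn_iff_infix as bs).mp hin)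
        symm
        rw [beq_iff_eq]
        exact hdrop
      · rw [if_neg (fun h => hin h.2), if_neg (not_not_intro hsucc)]
        have hfold := foldIns_eq_go2 bs.length as bs 0 0 (by omega) (by omega)
        simp only [Nat.cast_zero, List.drop_zero, Nat.sub_zero] at hfold
        rw [hfold]
        have hninf : ¬ as <:+: bs := fun hinf =>
          hin ((PySem.Chars.isIn_iff_infix as bs).mpr hinf)
        have hc : cpl as bs < as.length := by
          rcases Nat.lt_or_ge (cpl as bs) as.length with h | h
          · exact h
          · exact absurd (cpl_prefix as bs (by omega)
              (le_antisymm (cpl_le_left as bs) h)).isInfix hninf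
        rw [Bool.eq_iff_iff]
        simp only [beq_iff_eq]
        exact go2_spec bs as hsucc hc
    · rw [if_neg (fun h => hsucc h.1), if_pos hsucc, if_pos (by omega)]
  · -- equal lengths
    rw [if_pos heq,
      if_neg (by omega : ¬ ((as.length : Int) - (bs.length : Int)).natAbs > 1),
      if_pos heq]
    have hfold := foldEq_eq_goEq bs.length as bs 0 0 (by omega)
    simp only [Nat.cast_zero, List.drop_zero] at hfold
    rw [show ((as.length : Nat) : Int) = ((bs.length : Nat) : Int) from by exact_mod_cast heq,
      hfold]
    rw [Bool.eq_iff_iff]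
    simp only [beq_iff_eq, Bool.and_eq_true, decide_eq_true_eq]
    exact goEq_spec bs as heq
  · -- as is strictly longer
    rw [if_neg (by omega : ¬ as.length = bs.length), if_neg (by omega : ¬ as.length < bs.length)]
    by_cases hsucc : bs.length + 1 = as.length
    · have hsub : as.length - 1 = bs.length := by omega
      rw [if_neg (by omega : ¬ ((as.length : Int) - (bs.length : Int)).natAbs > 1),
        if_neg (by omega : ¬ as.length = bs.length), if_neg (by omega : ¬ as.length < bs.length)]
      by_cases hin : PySem.Chars.isIn bs as = true
      · rw [if_pos ⟨hsub, hin⟩]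
        have hdrop := infix_drop bs as hsucc ((PySem.Chars.isIn_iff_infix bs as).mp hin)
        symm
        rw [beq_iff_eq, cpl_comm as bs]
        exact hdrop.symm
      · rw [if_neg (fun h => hin h.2), if_neg (not_not_intro hsub), stepDel_eq]
        have hfold := foldIns_eq_go2 as.length bs as 0 0 (by omega) (by omega)
        simp only [Nat.cast_zero, List.drop_zero, Nat.sub_zero] at hfold
        rw [hfold]
        have hninf : ¬ bs <:+: as := fun hinf =>
          hin ((PySem.Chars.isIn_iff_infix bs as).mpr hinf)
        have hc : cpl bs as < bs.length := by
          rcases Nat.lt_or_ge (cpl bs as) bs.length with h | h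
          · exact h
          · exact absurd (cpl_prefix bs as (by omega)
              (le_antisymm (cpl_le_left bs as) h)).isInfix hninf
        rw [Bool.eq_iff_iff]
        simp only [beq_iff_eq]
        rw [cpl_comm as bs, go2_spec as bs hsucc hc]
        exact eq_comm
    · rw [if_neg (fun h => absurd h.1 (by omega : ¬ as.length - 1 = bs.length)),
        if_pos (by omega : as.length - 1 ≠ bs.length), if_pos (by omega)]

lemma chain_eq : ∀ (words : List String), isWordChain words = isWordChain_alt words
  | [] => rfl
  | [_] => rfl
  | w1 :: w2 :: rest => by
    have ih := chain_eq (w2 :: rest)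
    simp only [isWordChain, isWordChain_alt, List.tail_cons, List.zip_cons_cons, List.all_cons]
    rw [step_eq]
    cases h : oneEdit w1 w2
    · simp
    · simpa [isWordChain_alt] using ih

-- ===== VERDICT (by name: the statement is the Claim_ definition above) =====
theorem isWordChain_spec : Claim_equal_isWordChain := by
  intro words _
  unfold Spec_isWordChain
  exact chain_eq words
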